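-- pv_equiv track=rewrite | github.com/pypi-data/pypi-mirror-401 | packages/strutex/strutex-1.3.7-py3-none-any.whl/strutex/extractors/formatted.py | _preserve_indentation
-- ===== SOURCE A (Python) =====
-- from typing import Optional, List, Any, Literal, Union
--
-- def _preserve_indentation(text: str) -> str:
--     """Preserve and normalize indentation."""
--     if not text:
--         return text
--
--     lines = text.split('\n')
--     processed_lines: List[str] = []
--
--     for line in lines:
--         stripped = line.lstrip(' ')
--         if stripped:
--             leading_spaces = len(line) - len(stripped)
--             indent_level = leading_spaces // 4
--             normalized_indent = "  " * indent_level
--             processed_lines.append(normalized_indent + stripped)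
--         else:
--             processed_lines.append(line)
--
--     return '\n'.join(processed_lines)
-- ===== SOURCE B (Python) =====
-- def _preserve_indentation(text: str) -> str:
--     """Preserve and normalize indentation (single scan over the string; no split/join of a line list)."""
--     out = []
--     i = 0
--     n = len(text)
--     while i < n:
--         j = i
--         while j < n and text[j] == ' ':
--             j += 1
--         if j < n and text[j] != '\n':
--             # line has content: replace its leading spaces
--             out.append('  ' * ((j - i) // 4))
--         else:
--             # all-space (or empty) line: keep it verbatim
--             out.append(text[i:j])
--         k = text.find('\n', j)
--         if k == -1:
--             out.append(text[j:])
--             i = n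
--         else:
--             out.append(text[j:k])
--             out.append('\n')
--             i = k + 1
--     return ''.join(out)
-- ===== Notes on version B (the rewrite author's own statement) =====
-- stated objective: alternative
-- what changed: Replaces split-into-lines / per-line list building / join with a single character-level pass over the string that rewrites each leading-space run in place, never materialising the line list.
import Mathlib
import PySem

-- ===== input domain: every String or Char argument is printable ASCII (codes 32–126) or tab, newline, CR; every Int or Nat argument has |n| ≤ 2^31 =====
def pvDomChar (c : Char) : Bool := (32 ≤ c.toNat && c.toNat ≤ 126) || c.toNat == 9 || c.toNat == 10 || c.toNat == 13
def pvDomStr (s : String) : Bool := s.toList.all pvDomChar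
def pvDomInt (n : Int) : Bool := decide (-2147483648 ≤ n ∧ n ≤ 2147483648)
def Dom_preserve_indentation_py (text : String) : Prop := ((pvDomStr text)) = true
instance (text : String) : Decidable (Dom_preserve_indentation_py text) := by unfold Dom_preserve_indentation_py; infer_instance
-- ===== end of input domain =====

-- B replaces A's split-into-lines / per-line loop / join with a single character-level pass; same result.

-- ===== PORT A =====
-- per-line body of A's loop: line.lstrip(' ') is ported by hand as dropWhile (· == ' ') — exact,
-- since lstrip(' ') removes exactly the leading run of spaces.
def pvLineA (line : List Char) : List Char :=
  let stripped := line.dropWhile (fun c => c == ' ')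
  if stripped ≠ [] then
    PySem.List.pyRepeat [' ', ' '] (PySem.Int.floordiv ((line.length : Int) - stripped.length) 4) ++ stripped
  else line

def preserve_indentation_py (text : String) : String :=
  if text = "" then text
  else
    let lines := PySem.Chars.splitOn text.toList ['\n']
    let processed := lines.foldl (fun acc line => acc ++ [pvLineA line]) []
    String.ofList (PySem.Chars.join ['\n'] processed)

-- ===== PORT B =====
-- one pass (Source B's while loop as structural recursion on the remaining characters):
-- consume the leading space run, emit its replacement (or the run itself for a
-- content-free line), copy the rest of the line and the newline, recurse.
def pvAltGo (cs : List Char) : List Char :=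
  let sp := cs.takeWhile (fun c => c == ' ')
  let rest := cs.dropWhile (fun c => c == ' ')
  let head :=
    match rest with
    | c :: _ => if c = '\n' then sp else PySem.List.pyRepeat [' ', ' '] (PySem.Int.floordiv ((sp.length : Int)) 4)
    | [] => sp
  let lineRest := rest.takeWhile (fun c => !(c == '\n'))
  match h : rest.dropWhile (fun c => !(c == '\n')) with
  | '\n' :: tail => head ++ lineRest ++ '\n' :: pvAltGo tail
  | _ => head ++ lineRest
termination_by cs.length
decreasing_by
  have h1 : (List.dropWhile (fun c => !(c == '\n')) (List.dropWhile (fun c => c == ' ') cs)).length ≤ cs.length :=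
    le_trans (List.length_dropWhile_le _ _) (List.length_dropWhile_le _ _)
  rw [h] at h1; simp at h1; omega


def preserve_indentation_py_alt (text : String) : String :=
  String.ofList (pvAltGo text.toList)

-- ===== PRECONDITION & SPEC =====
def Spec_preserve_indentation_py (text : String) (out : String) : Prop := out = preserve_indentation_py_alt text
instance (text : String) (out : String) : Decidable (Spec_preserve_indentation_py text out) := by unfold Spec_preserve_indentation_py; infer_instance

-- ===== CLAIM (what is proved, stated in full; the proofs are below) =====
def Claim_equal_preserve_indentation_py : Prop := ∀ (text : String), Dom_preserve_indentation_py text → Spec_preserve_indentation_py text (preserve_indentation_py text)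

-- ===== LEMMAS AND PROOFS =====

-- the line decomposition of text.split('\n'), in structural form
mutual
def pvLines (cs : List Char) : List (List Char) :=
  (cs.takeWhile (fun c => !(c == '\n'))) :: pvLinesAux (cs.dropWhile (fun c => !(c == '\n')))
termination_by 2 * cs.length + 1
decreasing_by
  have h1 : (List.dropWhile (fun c => !(c == '\n')) cs).length ≤ cs.length := List.length_dropWhile_le _ _
  omega
def pvLinesAux : List Char → List (List Char)
  | [] => []
  | _ :: r => pvLines r
termination_by cs => 2 * cs.length
decreasing_by simp; omega
end

def pvMapHead (f : List Char → List Char) : List (List Char) → List (List Char)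
  | [] => []
  | x :: xs => f x :: xs

theorem pv_splitOn_go (fuel : Nat) (cs cur : List Char) (acc : List (List Char))
    (hf : cs.length ≤ fuel) :
    PySem.Chars.splitOn.go ['\n'] fuel cs cur acc
      = acc.reverse ++ pvMapHead (cur.reverse ++ ·) (pvLines cs) := by
  induction fuel generalizing cs cur acc with
  | zero =>
    have : cs = [] := by cases cs <;> simp_all
    subst this
    rw [PySem.Chars.splitOn.go.eq_def]
    simp [pvLines, pvLinesAux, pvMapHead]
  | succ n ih =>
    match cs with
    | [] =>
      rw [PySem.Chars.splitOn.go.eq_def]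
      simp [pvLines, pvLinesAux, pvMapHead]
    | c :: rest =>
      rw [PySem.Chars.splitOn.go.eq_def]
      by_cases hc : c = '\n'
      · subst hc
        have hp : List.isPrefixOf ['\n'] ('\n' :: rest) = true := by simp [List.isPrefixOf]
        simp only [hp, if_pos, List.length_singleton, List.drop_succ_cons, List.drop_zero]
        rw [ih rest [] (cur.reverse :: acc) (by simp at hf; omega)]
        rw [pvLines]
        simp [pvMapHead, pvLines, pvLinesAux, List.takeWhile_cons, List.dropWhile_cons]
      · have hp : List.isPrefixOf ['\n'] (c :: rest) = false := by
          simp [List.isPrefixOf]; exact fun h => hc h.symm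
        simp only [hp, Bool.false_eq_true, if_false]
        rw [ih rest (c :: cur) acc (by simp at hf; omega)]
        rw [pvLines, pvLines]
        have hcb : (!(c == '\n')) = true := by simp [hc]
        simp [List.takeWhile_cons, List.dropWhile_cons, hcb, pvMapHead]

theorem pv_splitOn_eq (cs : List Char) : PySem.Chars.splitOn cs ['\n'] = pvLines cs := by
  rw [PySem.Chars.splitOn]
  rw [pv_splitOn_go cs.length.succ cs [] [] (by omega)]
  rw [pvLines]
  simp [pvMapHead]

theorem pv_tw_split (p q : Char → Bool) (hpq : ∀ c, p c = true → q c = true) (cs : List Char) :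
    cs.takeWhile q = cs.takeWhile p ++ (cs.dropWhile p).takeWhile q := by
  induction cs with
  | nil => simp
  | cons c t ih =>
    by_cases hp : p c = true
    · simp [List.takeWhile_cons, List.dropWhile_cons, hp, hpq c hp, ih]
    · simp [List.takeWhile_cons, List.dropWhile_cons, hp]

theorem pv_dw_split (p q : Char → Bool) (hpq : ∀ c, p c = true → q c = true) (cs : List Char) :
    cs.dropWhile q = (cs.dropWhile p).dropWhile q := by
  induction cs with
  | nil => simp
  | cons c t ih =>
    by_cases hp : p c = true
    · simp [List.dropWhile_cons, hp, hpq c hp, ih]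
    · simp [List.dropWhile_cons, hp]

theorem pv_dropWhile_cons_head (p : Char → Bool) (cs c t) (h : List.dropWhile p cs = c :: t) :
    p c = false := by
  have hne : List.dropWhile p cs ≠ [] := by simp [h]
  have := List.head_dropWhile_not p hne
  simpa [h] using this

theorem pv_lineA (sp lineRest : List Char)
    (hsp : ∀ c ∈ sp, c = ' ')
    (hlr : lineRest = [] ∨ ∃ c t, lineRest = c :: t ∧ (c == ' ') = false) :
    pvLineA (sp ++ lineRest)
      = (if lineRest = [] then sp
         else PySem.List.pyRepeat [' ', ' '] (PySem.Int.floordiv ((sp.length : Int)) 4)) ++ lineRest := by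
  have hdw : (sp ++ lineRest).dropWhile (fun c => c == ' ') = lineRest := by
    rw [List.dropWhile_append]
    have h1 : sp.dropWhile (fun c => c == ' ') = [] := by
      rw [List.dropWhile_eq_nil_iff]
      intro x hx; simp [hsp x hx]
    rw [h1]
    simp
    rcases hlr with h | ⟨c, t, rfl, hc⟩
    · simp [h]
    · simp [List.dropWhile_cons]
      simpa using hc
  rw [pvLineA]
  simp only [hdw]
  rcases hlr with h | ⟨c, t, rfl, hc⟩
  · simp [h, hsp]
  · have hne : (c :: t) ≠ [] := by simp
    simp only [hne, ne_eq, not_false_iff, if_true, if_false]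
    have harg : (((sp ++ c :: t).length : Int)) - (((c :: t).length : Int)) = (sp.length : Int) := by
      push_cast [List.length_append]; ring
    rw [harg]


theorem pv_foldl_app (l : List (List Char)) (acc : List (List Char)) :
    l.foldl (fun a x => a ++ [pvLineA x]) acc = acc ++ l.map pvLineA := by
  induction l generalizing acc with
  | nil => simp
  | cons x xs ih => simp [List.foldl_cons, ih]

theorem pv_join_cons (a : List Char) (L : List (List Char)) (hL : L ≠ []) :
    PySem.Chars.join ['\n'] (a :: L) = a ++ '\n' :: PySem.Chars.join ['\n'] L := by
  cases L with
  | nil => exact absurd rfl hL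
  | cons b r => rw [PySem.Chars.join_cons_cons]; simp

theorem pv_main (cs : List Char) :
    pvAltGo cs = PySem.Chars.join ['\n'] ((pvLines cs).map pvLineA) := by
  suffices h : ∀ n (cs : List Char), cs.length ≤ n → pvAltGo cs = PySem.Chars.join ['\n'] ((pvLines cs).map pvLineA) from h cs.length cs le_rfl
  intro n
  induction n with
  | zero =>
    intro cs h
    have : cs = [] := by cases cs <;> simp_all
    subst this
    rw [pvAltGo, pvLines]
    simp [pvLinesAux, pvLineA]
  | succ n ih =>
    intro cs hlen
    have hq : ∀ c : Char, (c == ' ') = true → (!(c == '\n')) = true := by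
      intro c h
      simp at h
      subst h
      decide
    have hsp : ∀ c ∈ cs.takeWhile (fun c => c == ' '), c = ' ' := by
      intro c hc
      simpa using List.mem_takeWhile_imp hc
    have htw : cs.takeWhile (fun c => !(c == '\n'))
        = cs.takeWhile (fun c => c == ' ')
          ++ (cs.dropWhile (fun c => c == ' ')).takeWhile (fun c => !(c == '\n')) :=
      pv_tw_split _ _ hq cs
    have hdw : cs.dropWhile (fun c => !(c == '\n'))
        = (cs.dropWhile (fun c => c == ' ')).dropWhile (fun c => !(c == '\n')) :=
      pv_dw_split _ _ hq cs
    rw [pvAltGo]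
    split
    · next tail heq =>
      have htl : tail.length ≤ n := by
        have h1 := List.length_dropWhile_le (fun c => !(c == '\n')) (List.dropWhile (fun c => c == ' ') cs)
        have h2 := List.length_dropWhile_le (fun c => c == ' ') cs
        rw [heq] at h1
        simp at h1
        omega
      rw [pvLines, hdw, heq, pvLinesAux]
      have hmapne : List.map pvLineA (pvLines tail) ≠ [] := by rw [pvLines]; simp
      rw [List.map_cons, pv_join_cons _ _ hmapne, ← ih tail htl]
      rw [htw]
      cases hrest : List.dropWhile (fun c => c == ' ') cs with
      | nil =>
        rw [hrest] at heq
        simp at heq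
      | cons c t =>
        have hcsp : (c == ' ') = false := pv_dropWhile_cons_head (fun c => c == ' ') cs c t hrest
        rw [hrest] at heq
        by_cases hc : c = '\n'
        · subst hc
          have hlr0 : List.takeWhile (fun c => !(c == '\n')) ('\n' :: t) = [] := by
            simp [List.takeWhile_cons]
          rw [hlr0, pv_lineA _ _ hsp (Or.inl rfl)]
          simp
        · have hcb : (!(c == '\n')) = true := by simp [hc]
          have hlr1 : List.takeWhile (fun c => !(c == '\n')) (c :: t) = c :: List.takeWhile (fun c => !(c == '\n')) t := by
            simp [List.takeWhile_cons, hcb]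
          rw [hlr1, pv_lineA _ _ hsp (Or.inr ⟨c, _, rfl, hcsp⟩)]
          simp [hc]
    · next harm =>
      have hnil : List.dropWhile (fun c => !(c == '\n')) (List.dropWhile (fun c => c == ' ') cs) = [] := by
        cases hdd : List.dropWhile (fun c => !(c == '\n')) (List.dropWhile (fun c => c == ' ') cs) with
        | nil => rfl
        | cons c t =>
          have hh := pv_dropWhile_cons_head _ _ _ _ hdd
          simp at hh
          subst hh
          exact absurd hdd (harm t)
      have htwr : List.takeWhile (fun c => !(c == '\n')) (List.dropWhile (fun c => c == ' ') cs) = List.dropWhile (fun c => c == ' ') cs := by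
        rw [List.takeWhile_eq_self_iff]
        intro x hx
        exact List.dropWhile_eq_nil_iff.mp hnil x hx 
      rw [pvLines, hdw, hnil, pvLinesAux, List.map_cons, List.map_nil, PySem.Chars.join_singleton]
      rw [htw]
      cases hrest : List.dropWhile (fun c => c == ' ') cs with
      | nil =>
        simp only [List.takeWhile_nil]
        rw [pv_lineA _ _ hsp (Or.inl rfl)]
        simp
      | cons c t =>
        have hcsp : (c == ' ') = false := pv_dropWhile_cons_head (fun c => c == ' ') cs c t hrest
        have hc : ¬ c = '\n' := by
          intro hc
          subst hc
          rw [hrest] at hnil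
          simp [List.dropWhile_cons] at hnil
        have hcb : (!(c == '\n')) = true := by simp [hc]
        have hlr1 : List.takeWhile (fun c => !(c == '\n')) (c :: t) = c :: List.takeWhile (fun c => !(c == '\n')) t := by
          simp [List.takeWhile_cons, hcb]
        rw [hlr1, pv_lineA _ _ hsp (Or.inr ⟨c, _, rfl, hcsp⟩)]
        simp [hc]

-- ===== VERDICT (by name: the statement is the Claim_ definition above) =====
theorem preserve_indentation_py_spec : Claim_equal_preserve_indentation_py := by
  intro text _
  unfold Spec_preserve_indentation_py preserve_indentation_py preserve_indentation_py_alt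
  by_cases h : text = ""
  · subst h
    rw [if_pos rfl]
    rw [show ("" : String).toList = [] from rfl, pvAltGo]
    simp
  · rw [if_neg h]
    simp only []
    rw [pv_splitOn_eq, pv_foldl_app, List.nil_append, pv_main]
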